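-- pv_equiv track=rewrite | github.com/vansh-31/LeetCode | 3rd_Streak/Day19.py | prev_next_Smaller
-- ===== SOURCE A (Python) =====
-- import collections
--
-- def prev_next_Smaller(arr):
--     n = len(arr)
--     prev = [-1] * n
--     next = [n] * n
--     stack = collections.deque()
--     stack.append(-1)
--     for i in range(n):
--         while stack[-1] != -1 and arr[stack[-1]] >= arr[i]:
--             stack.pop()
--         prev[i] = stack[-1]
--         stack.append(i)
--     stack = collections.deque()
--     stack.append(n)
--     for i in range(n - 1, -1, -1):
--         while stack[-1] != n and arr[stack[-1]] >= arr[i]: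
--             stack.pop()
--         next[i] = stack[-1]
--         stack.append(i)
--     return [prev, next]
-- ===== SOURCE B (Python) =====
-- def prev_next_Smaller(arr):
--     n = len(arr)
--
--     def prev_of(i):
--         for j in range(i - 1, -1, -1):
--             if arr[j] < arr[i]:
--                 return j
--         return -1
--
--     def next_of(i):
--         for j in range(i + 1, n):
--             if arr[j] < arr[i]:
--                 return j
--         return n
--
--     return [[prev_of(i) for i in range(n)], [next_of(i) for i in range(n)]]
-- ===== Notes on version B (the rewrite author's own statement) =====
-- stated objective: simpler
-- what changed: Replaced the two monotonic-stack passes (deque with sentinel push/pop) by direct per-index scans: for each i, scan left for the first strictly smaller element and right likewise, built as two comprehensions.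
import Mathlib
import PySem

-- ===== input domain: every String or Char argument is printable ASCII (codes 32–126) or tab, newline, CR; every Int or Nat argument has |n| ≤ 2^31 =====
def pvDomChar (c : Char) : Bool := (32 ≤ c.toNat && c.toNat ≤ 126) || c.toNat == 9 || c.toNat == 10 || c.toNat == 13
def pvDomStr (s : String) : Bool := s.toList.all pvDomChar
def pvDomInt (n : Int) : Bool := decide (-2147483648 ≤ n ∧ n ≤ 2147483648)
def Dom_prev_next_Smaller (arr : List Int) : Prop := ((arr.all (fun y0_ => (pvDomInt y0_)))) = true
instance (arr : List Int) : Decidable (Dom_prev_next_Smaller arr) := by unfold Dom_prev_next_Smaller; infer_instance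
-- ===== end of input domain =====

-- B replaces the two monotonic-stack passes with direct per-index left/right scans for the
-- first strictly smaller element (simpler, not faster).

-- ===== PORT A =====
-- arr[j] for an index taken from the stack / loop counter; always in range when A runs, so getD never fires.
def pvVal (arr : List Int) (j : Int) : Int := (PySem.List.pyGet? arr j).getD 0

-- the `while stack[-1] != s and arr[stack[-1]] >= v: stack.pop()` loop (s = sentinel -1 resp. n);
-- the deque is a Lean list with its top at the head.
def popLoop (arr : List Int) (s v : Int) : List Int → List Int
  | [] => []
  | j :: rest => if j ≠ s ∧ pvVal arr j ≥ v then popLoop arr s v rest else j :: rest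

def prev_next_Smaller (arr : List Int) : List (List Int) :=
  let n := arr.length
  let prev := List.replicate n (-1 : Int)
  let next := List.replicate n (n : Int)
  let fw := (List.range n).foldl (fun (st : List Int × List Int) (i : Nat) =>
      let stack := popLoop arr (-1) (pvVal arr (i : Int)) st.2
      (st.1.set i (stack.headD 0), (i : Int) :: stack)) (prev, [-1])
  let bw := (List.range n).reverse.foldl (fun (st : List Int × List Int) (i : Nat) =>
      let stack := popLoop arr (n : Int) (pvVal arr (i : Int)) st.2
      (st.1.set i (stack.headD 0), (i : Int) :: stack)) (next, [(n : Int)])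
  [fw.1, bw.1]

-- ===== PORT B =====
-- `for j in range(i-1, -1, -1): if arr[j] < arr[i]: return j` / `return -1`
def scanPrev (arr : List Int) (v : Int) : Nat → Int
  | 0 => -1
  | j + 1 => if arr.getD j 0 < v then (j : Int) else scanPrev arr v j

-- `for j in range(i+1, n): if arr[j] < arr[i]: return j` / `return n`
def scanNext (arr : List Int) (v : Int) (n : Nat) (j : Nat) : Int :=
  if _h : j < n then
    if arr.getD j 0 < v then (j : Int) else scanNext arr v n (j + 1)
  else (n : Int)
  termination_by n - j

def prev_next_Smaller_alt (arr : List Int) : List (List Int) :=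
  let n := arr.length
  [(List.range n).map (fun i => scanPrev arr (arr.getD i 0) i),
   (List.range n).map (fun i => scanNext arr (arr.getD i 0) n (i + 1))]

-- ===== PRECONDITION & SPEC =====
def Spec_prev_next_Smaller (arr : List Int) (out : List (List Int)) : Prop := out = prev_next_Smaller_alt arr
instance (arr : List Int) (out : List (List Int)) : Decidable (Spec_prev_next_Smaller arr out) := by unfold Spec_prev_next_Smaller; infer_instance

-- ===== CLAIM (what is proved, stated in full; the proofs are below) =====
def Claim_equal_prev_next_Smaller : Prop := ∀ (arr : List Int), Dom_prev_next_Smaller arr → Spec_prev_next_Smaller arr (prev_next_Smaller arr)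

-- ===== LEMMAS AND PROOFS =====

-- the stack contents (indices only, top first) of the forward pass after processing 0..i-1
def candsF (arr : List Int) : Nat → List Nat
  | 0 => []
  | i + 1 => i :: (candsF arr i).filter (fun j => arr.getD j 0 < arr.getD i 0)

-- the stack contents of the backward pass after processing the k indices n-1 .. n-k
def candsB (arr : List Int) (n : Nat) : Nat → List Nat
  | 0 => []
  | k + 1 => (n - k - 1) :: (candsB arr n k).filter (fun j => arr.getD j 0 < arr.getD (n - k - 1) 0)

theorem pvVal_natCast (arr : List Int) (j : Nat) : pvVal arr (j : Int) = arr.getD j 0 := by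
  simp [pvVal, PySem.List.pyGet?_natCast, List.getD]

theorem candsF_pairwise (arr : List Int) (i : Nat) :
    (candsF arr i).Pairwise (fun a b => arr.getD b 0 < arr.getD a 0) := by
  induction i with
  | zero => simp [candsF]
  | succ i ih =>
    refine List.pairwise_cons.mpr ⟨?_, ih.filter _⟩
    intro b hb
    simpa using List.of_mem_filter hb

theorem candsB_mem (arr : List Int) (n : Nat) (k : Nat) (hk : k ≤ n) :
    ∀ j ∈ candsB arr n k, n - k ≤ j ∧ j < n := by
  induction k with
  | zero => simp [candsB]
  | succ k ih =>
    intro j hj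
    rcases List.mem_cons.mp hj with h | h
    · omega
    · have := ih (by omega) j (List.mem_of_mem_filter h); omega

theorem candsB_pairwise (arr : List Int) (n k : Nat) :
    (candsB arr n k).Pairwise (fun a b => arr.getD b 0 < arr.getD a 0) := by
  induction k with
  | zero => simp [candsB]
  | succ k ih =>
    refine List.pairwise_cons.mpr ⟨?_, ih.filter _⟩
    intro b hb
    simpa using List.of_mem_filter hb

theorem popLoop_filter (arr : List Int) (s v : Int) (l : List Nat)
    (hne : ∀ j ∈ l, (j : Int) ≠ s)
    (hp : l.Pairwise (fun a b => arr.getD b 0 < arr.getD a 0)) :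
    popLoop arr s v (l.map (Nat.cast) ++ [s]) =
      (l.filter (fun j => arr.getD j 0 < v)).map (Nat.cast) ++ [s] := by
  induction l with
  | nil => simp [popLoop]
  | cons j tl ih =>
    have hjne : (j : Int) ≠ s := hne j (by simp)
    rcases List.pairwise_cons.mp hp with ⟨hhead, htl⟩
    have hstep : popLoop arr s v ((j :: tl).map Nat.cast ++ [s]) =
        if (j : Int) ≠ s ∧ pvVal arr (j : Int) ≥ v then popLoop arr s v (tl.map Nat.cast ++ [s])
        else (j : Int) :: (tl.map Nat.cast ++ [s]) := by
      simp [popLoop]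
    by_cases hge : arr.getD j 0 ≥ v
    · have hc : ((j : Int) ≠ s ∧ pvVal arr (j : Int) ≥ v) := ⟨hjne, by rw [pvVal_natCast]; exact hge⟩
      rw [hstep, if_pos hc, ih (fun x hx => hne x (by simp [hx])) htl]
      have hnlt : ¬ (arr.getD j 0 < v) := by omega
      rw [List.filter_cons_of_neg (by simpa using hnlt)]
    · have hlt : arr.getD j 0 < v := by omega
      have hc : ¬ ((j : Int) ≠ s ∧ pvVal arr (j : Int) ≥ v) := by
        rw [pvVal_natCast]; intro h; exact absurd h.2 (by omega)
      rw [hstep, if_neg hc, List.filter_cons_of_pos (by simpa using hlt)]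
      have hfil : tl.filter (fun x => decide (arr.getD x 0 < v)) = tl := by
        apply List.filter_eq_self.mpr
        intro x hx
        have := hhead x hx
        simp only [decide_eq_true_eq]
        omega
      rw [hfil]
      simp

theorem headD_filter_candsF (arr : List Int) (v : Int) (i : Nat) :
    ((((candsF arr i).filter (fun j => arr.getD j 0 < v)).map (Nat.cast : Nat → Int)) ++ [(-1 : Int)]).headD 0
      = scanPrev arr v i := by
  induction i with
  | zero => simp [candsF, scanPrev]
  | succ i ih =>
    simp only [candsF, scanPrev]
    by_cases h : arr.getD i 0 < v
    · rw [List.filter_cons_of_pos (by simp only [decide_eq_true_eq]; exact h), if_pos h]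
      simp
    · have hcomp : ((candsF arr i).filter (fun j => decide (arr.getD j 0 < arr.getD i 0))).filter
          (fun j => decide (arr.getD j 0 < v)) = (candsF arr i).filter (fun j => decide (arr.getD j 0 < v)) := by
        rw [List.filter_filter]
        apply List.filter_congr
        intro x _
        by_cases hxv : arr.getD x 0 < v
        · have h2 : arr.getD x 0 < arr.getD i 0 := by omega
          simp only [List.getD_eq_getElem?_getD] at hxv h2
          simp [hxv, h2]
        · simp only [List.getD_eq_getElem?_getD] at hxv
          simp [hxv]
      rw [List.filter_cons_of_neg (by simp only [decide_eq_true_eq]; exact h), if_neg h, hcomp]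
      exact ih

theorem headD_filter_candsB (arr : List Int) (v : Int) (n : Nat) :
    ∀ k, k ≤ n →
    ((((candsB arr n k).filter (fun j => arr.getD j 0 < v)).map (Nat.cast : Nat → Int)) ++ [(n : Int)]).headD 0
      = scanNext arr v n (n - k) := by
  intro k
  induction k with
  | zero =>
    intro _
    rw [scanNext]
    simp [candsB]
  | succ k ih =>
    intro hk
    have hm : n - k - 1 < n := by omega
    have hms : n - k - 1 + 1 = n - k := by omega
    rw [show n - (k + 1) = n - k - 1 by omega, scanNext, dif_pos hm]
    simp only [candsB]
    by_cases h : arr.getD (n - k - 1) 0 < v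
    · rw [List.filter_cons_of_pos (by simp only [decide_eq_true_eq]; exact h), if_pos h]
      simp
    · have hcomp : ((candsB arr n k).filter (fun j => decide (arr.getD j 0 < arr.getD (n - k - 1) 0))).filter
          (fun j => decide (arr.getD j 0 < v)) = (candsB arr n k).filter (fun j => decide (arr.getD j 0 < v)) := by
        rw [List.filter_filter]
        apply List.filter_congr
        intro x _
        by_cases hxv : arr.getD x 0 < v
        · have h2 : arr.getD x 0 < arr.getD (n - k - 1) 0 := by omega
          simp only [List.getD_eq_getElem?_getD] at hxv h2
          simp [hxv, h2]
        · simp only [List.getD_eq_getElem?_getD] at hxv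
          simp [hxv]
      rw [List.filter_cons_of_neg (by simp only [decide_eq_true_eq]; exact h), if_neg h, hcomp, hms]
      exact ih (by omega)

theorem set_map_range (n k : Nat) (_hk : k < n) (g : Nat → Int) (v : Int) :
    (((List.range n).map g).set k v) = (List.range n).map (fun i => if i = k then v else g i) := by
  apply List.ext_getElem
  · simp
  · intro i h1 h2
    have hi : i < n := by simpa using h2
    rw [List.getElem_set]
    simp only [List.getElem_map, List.getElem_range]
    by_cases hik : k = i
    · subst hik; simp
    · rw [if_neg hik, if_neg (fun hh => hik hh.symm)]

theorem fwd_inv (arr : List Int) (k : Nat) (hk : k ≤ arr.length) :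
    (List.range k).foldl (fun (st : List Int × List Int) (i : Nat) =>
        let stack := popLoop arr (-1) (pvVal arr (i : Int)) st.2
        (st.1.set i (stack.headD 0), (i : Int) :: stack))
      (List.replicate arr.length (-1 : Int), [-1]) =
    ((List.range arr.length).map (fun i => if i < k then scanPrev arr (arr.getD i 0) i else -1),
     (candsF arr k).map (Nat.cast) ++ [-1]) := by
  induction k with
  | zero =>
    simp only [List.range_zero, List.foldl_nil, candsF, List.map_nil, List.nil_append, Prod.mk.injEq]
    refine ⟨?_, trivial⟩
    apply List.ext_getElem
    · simp
    · intro i h1 h2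
      simp
  | succ k ih =>
    rw [List.range_succ, List.foldl_append, ih (by omega)]
    simp only [List.foldl_cons, List.foldl_nil]
    have hpop : popLoop arr (-1) (pvVal arr (k : Int)) ((candsF arr k).map Nat.cast ++ [-1]) =
        ((candsF arr k).filter (fun j => arr.getD j 0 < arr.getD k 0)).map Nat.cast ++ [-1] := by
      rw [pvVal_natCast]
      exact popLoop_filter arr (-1) _ _ (fun j _ => by simp) (candsF_pairwise arr k)
    rw [hpop]
    simp only [Prod.mk.injEq]
    refine ⟨?_, by simp [candsF]⟩
    rw [headD_filter_candsF arr (arr.getD k 0) k,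
      set_map_range arr.length k (by omega) _ (scanPrev arr (arr.getD k 0) k)]
    apply List.map_congr_left
    intro i hi
    by_cases h : i = k
    · subst h; simp
    · rw [if_neg h]
      by_cases h2 : i < k
      · rw [if_pos h2, if_pos (by omega)]
      · rw [if_neg h2, if_neg (by omega)]

theorem bwd_inv (arr : List Int) (m : Nat) (hm : m ≤ arr.length) :
    ((List.range m).reverse).foldl (fun (st : List Int × List Int) (i : Nat) =>
        let stack := popLoop arr (arr.length : Int) (pvVal arr (i : Int)) st.2
        (st.1.set i (stack.headD 0), (i : Int) :: stack))
      ((List.range arr.length).map (fun i => if m ≤ i then scanNext arr (arr.getD i 0) arr.length (i + 1) else (arr.length : Int)),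
       (candsB arr arr.length (arr.length - m)).map Nat.cast ++ [(arr.length : Int)]) =
    ((List.range arr.length).map (fun i => scanNext arr (arr.getD i 0) arr.length (i + 1)),
     (candsB arr arr.length arr.length).map Nat.cast ++ [(arr.length : Int)]) := by
  induction m with
  | zero =>
    simp only [List.range_zero, List.reverse_nil, List.foldl_nil, Nat.sub_zero, Prod.mk.injEq]
    refine ⟨?_, trivial⟩
    apply List.map_congr_left
    intro i hi
    simp
  | succ m ih =>
    set n := arr.length with hn
    rw [List.range_succ, List.reverse_append]
    simp only [List.reverse_cons, List.reverse_nil, List.nil_append, List.singleton_append,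
      List.foldl_cons]
    have hmem := candsB_mem arr n (n - (m + 1)) (by omega)
    have hpop : popLoop arr (n : Int) (pvVal arr (m : Int)) ((candsB arr n (n - (m + 1))).map Nat.cast ++ [(n : Int)]) =
        ((candsB arr n (n - (m + 1))).filter (fun j => arr.getD j 0 < arr.getD m 0)).map Nat.cast ++ [(n : Int)] := by
      rw [pvVal_natCast]
      refine popLoop_filter arr (n : Int) _ _ ?_ (candsB_pairwise arr n _)
      intro j hj
      have := hmem j hj
      simp only [ne_eq, Nat.cast_inj]
      omega
    have hstack : (m : Int) :: (((candsB arr n (n - (m + 1))).filter (fun j => arr.getD j 0 < arr.getD m 0)).map Nat.cast ++ [(n : Int)])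
        = (candsB arr n (n - m)).map Nat.cast ++ [(n : Int)] := by
      have hcb : candsB arr n (n - m) = m :: (candsB arr n (n - (m + 1))).filter (fun j => arr.getD j 0 < arr.getD m 0) := by
        have h1 : n - m = (n - (m + 1)) + 1 := by omega
        rw [h1, candsB, show n - (n - (m + 1)) - 1 = m by omega]
      rw [hcb]
      simp
    have hhead : (((candsB arr n (n - (m + 1))).filter (fun j => arr.getD j 0 < arr.getD m 0)).map (Nat.cast : Nat → Int) ++ [(n : Int)]).headD 0
        = scanNext arr (arr.getD m 0) n (m + 1) := by
      have := headD_filter_candsB arr (arr.getD m 0) n (n - (m + 1)) (by omega)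
      rwa [show n - (n - (m + 1)) = m + 1 by omega] at this
    have harr : ((List.range n).map (fun i => if m + 1 ≤ i then scanNext arr (arr.getD i 0) n (i + 1) else (n : Int))).set m
          ((((candsB arr n (n - (m + 1))).filter (fun j => arr.getD j 0 < arr.getD m 0)).map (Nat.cast : Nat → Int) ++ [(n : Int)]).headD 0)
        = (List.range n).map (fun i => if m ≤ i then scanNext arr (arr.getD i 0) n (i + 1) else (n : Int)) := by
      rw [hhead, set_map_range n m (by omega) _ (scanNext arr (arr.getD m 0) n (m + 1))]
      apply List.map_congr_left
      intro i hi
      by_cases h : i = m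
      · subst h; simp
      · rw [if_neg h]
        by_cases h2 : m + 1 ≤ i
        · rw [if_pos h2, if_pos (by omega)]
        · rw [if_neg h2, if_neg (by omega)]
    rw [hpop, harr, hstack]
    exact ih (by omega)

-- ===== VERDICT (by name: the statement is the Claim_ definition above) =====
theorem prev_next_Smaller_spec : Claim_equal_prev_next_Smaller := by
  intro arr _
  unfold Spec_prev_next_Smaller prev_next_Smaller prev_next_Smaller_alt
  simp only []
  have hf := fwd_inv arr arr.length (le_refl _)
  have hb0 : (List.range arr.length).map (fun i => if arr.length ≤ i then scanNext arr (arr.getD i 0) arr.length (i + 1) else (arr.length : Int)) = List.replicate arr.length ((arr.length : Int)) := by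
    apply List.ext_getElem
    · simp
    · intro i h1 h2
      have : i < arr.length := by simpa using h2
      simp [this]
  have hb := bwd_inv arr arr.length (le_refl _)
  rw [show arr.length - arr.length = 0 from by omega, candsB] at hb
  simp only [List.map_nil, List.nil_append] at hb
  rw [hb0] at hb
  rw [hf, hb]
  congr 1
  apply List.map_congr_left
  intro i hi
  have : i < arr.length := by simpa using hi
  simp [this]
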